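-- pv_equiv track=rewrite | github.com/61515/simpleDB | simpleDB.py | read_a_word
-- ===== SOURCE A (Python) =====
-- def read_a_word(sentence, index, another_space=None, except_space=None):
--     list_space = ['\t', ' ', '\n']
--     if another_space:
--         for _space in another_space:
--             list_space.append(_space)
--     if except_space:
--         for _space in except_space:
--             list_space.remove(_space)
--
--     while index < len(sentence):
--         if sentence[index] in list_space:
--             break
--         else:
--             index += 1
--
--     return index
-- ===== SOURCE B (Python) =====
-- def read_a_word(sentence, index, another_space=None, except_space=None):
--     list_space = ['\t', ' ', '\n']
--     if another_space:
--         list_space += another_space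
--     if except_space:
--         for _space in except_space:
--             list_space.remove(_space)
--     tail = sentence[index:]
--     present = set(list_space) & set(tail)
--     return index + min((tail.find(c) for c in present), default=len(tail))
-- ===== Notes on version B (the rewrite author's own statement) =====
-- stated objective: alternative
-- what changed: Replaces A's character-by-character membership-testing while-loop with set arithmetic plus built-in substring search: slice off the tail, intersect the separator set with the tail's character set, and return index plus the minimum tail.find position of those separators (len(tail) if none occurs). Pre_ excludes negative indices (outside the natural domain: A there raises IndexError or scans via Python's accidental negative-index wraparound) and except_space lists on which list.remove raises ValueError in both programs.
-- outside the precondition, e.g. on read_a_word('ab cd', -2, None, None): A returns 2, B returns 0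
import Mathlib
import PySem

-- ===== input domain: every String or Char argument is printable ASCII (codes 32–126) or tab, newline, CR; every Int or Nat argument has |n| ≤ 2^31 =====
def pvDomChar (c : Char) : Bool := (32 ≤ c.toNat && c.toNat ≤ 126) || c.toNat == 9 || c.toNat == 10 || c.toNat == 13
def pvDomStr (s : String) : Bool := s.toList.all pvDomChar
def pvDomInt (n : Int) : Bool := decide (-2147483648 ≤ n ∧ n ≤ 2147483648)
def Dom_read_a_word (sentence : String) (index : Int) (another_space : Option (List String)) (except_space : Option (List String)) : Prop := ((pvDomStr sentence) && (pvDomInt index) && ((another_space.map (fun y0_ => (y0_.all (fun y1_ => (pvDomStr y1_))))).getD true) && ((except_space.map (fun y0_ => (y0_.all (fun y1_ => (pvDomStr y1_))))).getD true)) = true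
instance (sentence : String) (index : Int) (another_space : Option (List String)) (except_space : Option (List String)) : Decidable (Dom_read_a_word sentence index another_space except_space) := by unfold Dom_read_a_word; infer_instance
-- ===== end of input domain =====

-- B replaces A's character-by-character membership-testing while-loop with set arithmetic
-- plus built-in substring search: slice off the tail, intersect the separator set with the
-- tail's character set, and return index + the minimum tail.find position of those
-- separators (len(tail) if none occurs).

-- ===== PORT A =====
-- list_space = ['\t',' ','\n']; append another_space items; remove except_space items
-- (a failing remove is Python's ValueError: the fold returns none there, excluded by Pre_).
def buildSpacesA (another_space : Option (List String)) (except_space : Option (List String)) : Option (List String) :=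
  let ls : List String := ["\t", " ", "\n"]
  let ls : List String :=
    match another_space with
    | some l => if l.isEmpty then ls                  -- `if another_space:` truthiness
                else l.foldl (fun acc _space => acc ++ [_space]) ls   -- the append loop
    | none => ls
  match except_space with
  | some l =>
      if l.isEmpty then some ls
      else l.foldl (fun acc s => acc.bind (fun xs => PySem.List.remove? xs s)) (some ls)
  | none => some ls

-- the while-loop of A; the `none` branch is Python's IndexError (index < -len, excluded by Pre_)
def readWordLoopA (sentence : String) (spaces : List String) (index : Int) : Int :=
  if index < PySem.Str.len sentence then
    match PySem.Str.pyGet? sentence index with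
    | some c => if spaces.contains (String.ofList [c]) then index
                else readWordLoopA sentence spaces (index + 1)
    | none => index
  else index
termination_by (PySem.Str.len sentence - index).toNat
decreasing_by simp [PySem.Str.len_eq] at *; omega

def read_a_word (sentence : String) (index : Int) (another_space : Option (List String)) (except_space : Option (List String)) : Int :=
  match buildSpacesA another_space except_space with
  | some spaces => readWordLoopA sentence spaces index
  | none => index   -- Python A raises ValueError here; outside Pre_

-- ===== PORT B =====
-- same separator-list construction as Source B (list_space += another_space; the remove loop
-- keeps Python's ValueError as the fold's none, excluded by Pre_)
def buildSepsB (another_space : Option (List String)) (except_space : Option (List String)) : Option (List String) :=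
  let seps : List String := ["\t", " ", "\n"]
  let seps : List String :=
    match another_space with
    | some l => if l.isEmpty then seps else seps ++ l
    | none => seps
  match except_space with
  | some l =>
      if l.isEmpty then some seps
      else l.foldl (fun acc s => acc.bind (fun xs => PySem.List.remove? xs s)) (some seps)
  | none => some seps

-- set(tail): Python's set of the tail's characters, i.e. its distinct one-character strings
def pvMk1 (c : Char) : String := String.ofList [c]

def read_a_word_alt (sentence : String) (index : Int) (another_space : Option (List String)) (except_space : Option (List String)) : Int :=
  match buildSepsB another_space except_space with
  | some seps =>
      let tail : List Char := PySem.Chars.slice sentence.toList (some index) none    -- sentence[index:]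
      let present : PySem.Set String :=
        PySem.Set.inter (PySem.Set.ofList seps) (PySem.Set.ofList (tail.map pvMk1)) -- set(list_space) & set(tail)
      -- min((tail.find(c) for c in present), default=len(tail)); the min of distinct
      -- first-occurrence positions does not depend on the set's iteration order
      index + (PySem.List.min? (present.map (fun c => PySem.Chars.find tail c.toList)) (fun x => x)).getD (tail.length : Int)
  | none => index   -- Python B raises ValueError here; outside Pre_

-- ===== PRECONDITION & SPEC =====
-- Pre_ excludes (a) negative indices — outside the function's natural domain: A there either
-- raises IndexError (index < -len) or scans via Python's accidental negative-index wraparound —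
-- and (b) except_space lists removing more copies of a value than the built separator list
-- holds, on which both A and B raise ValueError.
def Pre_read_a_word (sentence : String) (index : Int) (another_space : Option (List String)) (except_space : Option (List String)) : Prop :=
  0 ≤ index ∧
  (∀ s ∈ except_space.getD [],
    (except_space.getD []).count s ≤ (["\t", " ", "\n"] ++ another_space.getD []).count s)
instance (sentence : String) (index : Int) (another_space : Option (List String)) (except_space : Option (List String)) : Decidable (Pre_read_a_word sentence index another_space except_space) := by unfold Pre_read_a_word; infer_instance
def pvWitness_read_a_word : String × Int × Option (List String) × Option (List String) := ("a b", 0, none, none)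

def Spec_read_a_word (sentence : String) (index : Int) (another_space : Option (List String)) (except_space : Option (List String)) (out : Int) : Prop := out = read_a_word_alt sentence index another_space except_space
instance (sentence : String) (index : Int) (another_space : Option (List String)) (except_space : Option (List String)) (out : Int) : Decidable (Spec_read_a_word sentence index another_space except_space out) := by unfold Spec_read_a_word; infer_instance

-- ===== CLAIM (what is proved, stated in full; the proofs are below) =====
def Claim_equal_read_a_word : Prop := ∀ (sentence : String) (index : Int) (another_space : Option (List String)) (except_space : Option (List String)), Dom_read_a_word sentence index another_space except_space → Pre_read_a_word sentence index another_space except_space → Spec_read_a_word sentence index another_space except_space (read_a_word sentence index another_space except_space)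

-- ===== LEMMAS AND PROOFS =====

-- position (relative to the start of t) of the first character of t that is a separator,
-- t.length if there is none: the value both programs compute on the tail t
def firstSepPos (seps : List String) : List Char → Int
  | [] => 0
  | c :: r => if pvMk1 c ∈ seps then 0 else 1 + firstSepPos seps r

theorem F_bounds (seps : List String) (t : List Char) :
    0 ≤ firstSepPos seps t ∧ firstSepPos seps t ≤ t.length := by
  induction t with
  | nil => simp [firstSepPos]
  | cons c r ih =>
    rw [firstSepPos]
    split_ifs
    · refine ⟨le_refl 0, ?_⟩
      positivity
    · simp only [List.length_cons]
      push_cast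
      omega

theorem F_lt_of_mem (seps : List String) (t : List Char) (c : Char)
    (hc : c ∈ t) (hs : pvMk1 c ∈ seps) : firstSepPos seps t < t.length := by
  induction t with
  | nil => simp at hc
  | cons c0 r ih =>
    rw [firstSepPos]
    by_cases h0 : pvMk1 c0 ∈ seps
    · rw [if_pos h0]; simp
    · rw [if_neg h0]
      have hcr : c ∈ r := by
        rcases List.mem_cons.mp hc with h | h
        · exact absurd (h ▸ hs) h0
        · exact h
      have := ih hcr
      simp only [List.length_cons]
      push_cast
      omega

theorem F_lt_spec (seps : List String) (t : List Char)
    (h : firstSepPos seps t < t.length) :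
    ∃ c r, t.drop (firstSepPos seps t).toNat = c :: r ∧ pvMk1 c ∈ seps := by
  induction t with
  | nil => rw [firstSepPos] at h; norm_num at h
  | cons c0 r0 ih =>
    rw [firstSepPos] at h ⊢
    by_cases h0 : pvMk1 c0 ∈ seps
    · rw [if_pos h0]
      exact ⟨c0, r0, by simp, h0⟩
    · rw [if_neg h0] at h ⊢
      have hb := F_bounds seps r0
      have hlt : firstSepPos seps r0 < r0.length := by
        simp only [List.length_cons] at h
        push_cast at h
        omega
      obtain ⟨c, r, hdrop, hmem⟩ := ih hlt
      refine ⟨c, r, ?_, hmem⟩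
      have ht : (1 + firstSepPos seps r0).toNat = (firstSepPos seps r0).toNat + 1 := by omega
      rw [ht, List.drop_succ_cons, hdrop]

theorem F_before (seps : List String) (t : List Char) (j : Nat)
    (hj : (j : Int) < firstSepPos seps t) :
    ∀ c r, t.drop j = c :: r → pvMk1 c ∉ seps := by
  induction t generalizing j with
  | nil => intro c r hd; simp at hd
  | cons c0 r0 ih =>
    rw [firstSepPos] at hj
    by_cases h0 : pvMk1 c0 ∈ seps
    · rw [if_pos h0] at hj; omega
    · rw [if_neg h0] at hj
      cases j with
      | zero =>
        intro c r hdrop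
        simp at hdrop
        rw [hdrop.1] at h0
        exact h0
      | succ j' =>
        intro c r hdrop
        rw [List.drop_succ_cons] at hdrop
        exact ih j' (by push_cast at hj ⊢; omega) c r hdrop

theorem singleton_prefix_iff {α : Type} (c : α) (l : List α) :
    [c] <+: l ↔ ∃ r, l = c :: r := by
  constructor
  · rintro ⟨r, rfl⟩; exact ⟨r, rfl⟩
  · rintro ⟨r, rfl⟩; exact ⟨r, rfl⟩

theorem singleton_infix_iff_mem {α : Type} (c : α) (l : List α) : [c] <:+: l ↔ c ∈ l := by
  constructor
  · intro h; exact List.singleton_sublist.mp h.sublist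
  · intro h
    obtain ⟨s, t, rfl⟩ := List.append_of_mem h
    exact ⟨s, t, by simp⟩

theorem find_ge_F (seps : List String) (t : List Char) (c : Char)
    (hc : c ∈ t) (hs : pvMk1 c ∈ seps) :
    firstSepPos seps t ≤ PySem.Chars.find t [c] := by
  have hp0 : 0 ≤ PySem.Chars.find t [c] :=
    (PySem.Chars.find_nonneg_iff t [c]).mpr ((singleton_infix_iff_mem c t).mpr hc)
  obtain ⟨hpre, _⟩ := PySem.Chars.find_spec hp0
  obtain ⟨r, hdrop⟩ := (singleton_prefix_iff c _).mp hpre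
  by_contra hlt
  have hFb := F_bounds seps t
  have hj : ((PySem.Chars.find t [c]).toNat : Int) < firstSepPos seps t := by omega
  exact F_before seps t _ hj c r hdrop hs

theorem find_at_F (seps : List String) (t : List Char)
    (h : firstSepPos seps t < t.length) :
    ∃ c, c ∈ t ∧ pvMk1 c ∈ seps ∧ PySem.Chars.find t [c] = firstSepPos seps t := by
  obtain ⟨c, r, hdrop, hmem⟩ := F_lt_spec seps t h
  have hct : c ∈ t := List.mem_of_mem_drop (hdrop ▸ List.mem_cons_self)
  refine ⟨c, hct, hmem, ?_⟩
  have hp0 : 0 ≤ PySem.Chars.find t [c] :=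
    (PySem.Chars.find_nonneg_iff t [c]).mpr ((singleton_infix_iff_mem c t).mpr hct)
  obtain ⟨_, hmin⟩ := PySem.Chars.find_spec hp0
  have hFb := F_bounds seps t
  have hle : firstSepPos seps t ≤ PySem.Chars.find t [c] := find_ge_F seps t c hct hmem
  by_contra hne
  have hlt : (firstSepPos seps t).toNat < (PySem.Chars.find t [c]).toNat := by omega
  exact hmin _ hlt ((singleton_prefix_iff c _).mpr ⟨r, hdrop⟩)

theorem mem_present_iff (seps : List String) (t : List Char) (y : String) :
    y ∈ PySem.Set.inter (PySem.Set.ofList seps) (PySem.Set.ofList (t.map pvMk1)) ↔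
      y ∈ seps ∧ ∃ c ∈ t, pvMk1 c = y := by
  rw [PySem.Set.mem_inter, PySem.Set.mem_ofList, PySem.Set.mem_ofList, List.mem_map]

-- B's min-expression on a tail t computes firstSepPos
theorem Bexpr_eq (seps : List String) (t : List Char) :
    (PySem.List.min?
        ((PySem.Set.inter (PySem.Set.ofList seps) (PySem.Set.ofList (t.map pvMk1))).map
          (fun c => PySem.Chars.find t c.toList)) (fun x => x)).getD (t.length : Int)
      = firstSepPos seps t := by
  set present := PySem.Set.inter (PySem.Set.ofList seps) (PySem.Set.ofList (t.map pvMk1)) with hpres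
  have hFb := F_bounds seps t
  rcases lt_or_eq_of_le hFb.2 with hlt | heq
  · -- a separator character occurs: the min is firstSepPos
    obtain ⟨c0, hc0t, hc0s, hfind⟩ := find_at_F seps t hlt
    have hmemp : pvMk1 c0 ∈ present := by
      rw [hpres, mem_present_iff]
      exact ⟨hc0s, c0, hc0t, rfl⟩
    have hFmem : firstSepPos seps t ∈ present.map (fun c => PySem.Chars.find t c.toList) := by
      rw [List.mem_map]
      refine ⟨pvMk1 c0, hmemp, ?_⟩
      rw [pvMk1, String.toList_ofList]
      exact hfind
    cases hm : PySem.List.min? (present.map (fun c => PySem.Chars.find t c.toList)) (fun x => x) with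
    | none =>
      rw [(PySem.List.min?_eq_none_iff _ _).mp hm] at hFmem
      simp at hFmem
    | some m =>
      have h1 : m ≤ firstSepPos seps t := PySem.List.min?_isMin hm _ hFmem
      have h2 : firstSepPos seps t ≤ m := by
        have hmmem := PySem.List.min?_mem hm
        rw [List.mem_map] at hmmem
        obtain ⟨y, hy, hym⟩ := hmmem
        rw [hpres, mem_present_iff] at hy
        obtain ⟨hys, c, hct, hcy⟩ := hy
        rw [← hym, ← hcy, pvMk1, String.toList_ofList]
        exact find_ge_F seps t c hct (hcy ▸ hys)
      simp only [Option.getD]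
      omega
  · -- no separator character occurs: present is empty and the default len(tail) is taken
    have hnone : ∀ c ∈ t, pvMk1 c ∉ seps := by
      intro c hct hcs
      exact absurd heq (ne_of_lt (F_lt_of_mem seps t c hct hcs))
    have hempty : present = [] := by
      rw [List.eq_nil_iff_forall_not_mem]
      intro y hy
      rw [hpres, mem_present_iff] at hy
      obtain ⟨hys, c, hct, hcy⟩ := hy
      exact hnone c hct (hcy ▸ hys)
    rw [hempty]
    simp only [List.map_nil]
    rw [(PySem.List.min?_eq_none_iff ([] : List Int) (fun x => x)).mpr rfl]
    simp [heq]

-- A's loop from i computes i + firstSepPos of the tail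
theorem loopA_eq_fuel (sentence : String) (seps : List String) :
    ∀ (m : Nat) (i : Int), 0 ≤ i → (PySem.Str.len sentence - i).toNat ≤ m →
      readWordLoopA sentence seps i = i + firstSepPos seps (sentence.toList.drop i.toNat) := by
  intro m
  induction m with
  | zero =>
    intro i h0 hm
    have hge : sentence.toList.length ≤ i.toNat := by
      rw [PySem.Str.len_eq] at hm; omega
    rw [readWordLoopA, if_neg (by rw [PySem.Str.len_eq]; omega),
        List.drop_eq_nil_of_le hge, firstSepPos]
    omega
  | succ m ih =>
    intro i h0 hm
    by_cases hlt : i < PySem.Str.len sentence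
    · have hlt' : i.toNat < sentence.toList.length := by
        rw [PySem.Str.len_eq] at hlt; omega
      have hget : PySem.Str.pyGet? sentence i = some (sentence.toList[i.toNat]) := by
        simp only [PySem.Str.pyGet?_eq, PySem.Chars.pyGet?_eq_listPyGet?]
        rw [PySem.List.pyGet?_of_nonneg _ h0]
        exact List.getElem?_eq_getElem hlt'
      have hdrop : sentence.toList.drop i.toNat
          = sentence.toList[i.toNat] :: sentence.toList.drop (i.toNat + 1) :=
        List.drop_eq_getElem_cons hlt'
      rw [readWordLoopA, if_pos hlt, hget]
      dsimp only
      rw [hdrop, firstSepPos]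
      simp only [pvMk1]
      by_cases hmem : String.ofList [sentence.toList[i.toNat]] ∈ seps
      · rw [if_pos (List.contains_iff_mem.mpr hmem), if_pos hmem]
        omega
      · rw [if_neg (by simpa using (fun h => hmem (List.contains_iff_mem.mp h))), if_neg hmem]
        rw [ih (i + 1) (by omega) (by rw [PySem.Str.len_eq] at *; omega)]
        have ht : (i + 1).toNat = i.toNat + 1 := by omega
        rw [ht]
        omega
    · have hge : sentence.toList.length ≤ i.toNat := by
        rw [PySem.Str.len_eq] at hlt; omega
      rw [readWordLoopA, if_neg hlt, List.drop_eq_nil_of_le hge, firstSepPos]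
      omega

theorem build_eq (another_space except_space : Option (List String)) :
    buildSpacesA another_space except_space = buildSepsB another_space except_space := by
  unfold buildSpacesA buildSepsB
  cases another_space with
  | none => rfl
  | some l => simp only [PySem.List.foldl_append_singleton]

-- ===== VERDICT (by name: the statement is the Claim_ definition above) =====
theorem read_a_word_spec : Claim_equal_read_a_word := by
  intro sentence index another_space except_space _dom pre
  unfold Spec_read_a_word read_a_word read_a_word_alt
  rw [← build_eq]
  cases buildSpacesA another_space except_space with
  | none => rfl
  | some seps =>
    dsimp only
    rw [PySem.Chars.slice_eq_listSlice, PySem.List.slice_from _ pre.1,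
        loopA_eq_fuel sentence seps (PySem.Str.len sentence - index).toNat index pre.1 le_rfl,
        Bexpr_eq]
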